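-- pv_equiv track=rewrite | github.com/strato-space/fast-agent | src/fast_agent/cli/commands/check_config.py | _get_named_alias_rows
-- ===== SOURCE A (Python) =====
-- from typing import Any
--
-- def _get_named_alias_rows(config_payload: dict[str, Any] | None) -> list[tuple[str, str]]:
--     if not isinstance(config_payload, dict):
--         return []
--
--     references_payload = config_payload.get("model_references")
--     if not isinstance(references_payload, dict):
--         return []
--
--     rows: list[tuple[str, str]] = []
--     for namespace, entries in sorted(references_payload.items(), key=lambda item: str(item[0])):
--         if not isinstance(namespace, str) or not isinstance(entries, dict):
--             continue
--         for alias_name, model in sorted(entries.items(), key=lambda item: str(item[0])):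
--             if not isinstance(alias_name, str) or not isinstance(model, str):
--                 continue
--             alias_token = f"${namespace}.{alias_name}"
--             rows.append((alias_token, model))
--     return rows
-- ===== SOURCE B (Python) =====
-- def _get_named_alias_rows(config_payload):
--     if not isinstance(config_payload, dict):
--         return []
--
--     references_payload = config_payload.get("model_references")
--     if not isinstance(references_payload, dict):
--         return []
--
--     # Insertion-sort approach: keep `ordered` sorted by (namespace, alias) at all
--     # times and place each valid triple at its position as it is discovered.
--     ordered = []
--     for namespace, entries in references_payload.items():
--         if not isinstance(namespace, str) or not isinstance(entries, dict):
--             continue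
--         for alias_name, model in entries.items():
--             if not isinstance(alias_name, str) or not isinstance(model, str):
--                 continue
--             i = 0
--             while i < len(ordered) and (ordered[i][0], ordered[i][1]) < (namespace, alias_name):
--                 i += 1
--             ordered.insert(i, (namespace, alias_name, model))
--     return [(f"${ns}.{alias}", model) for ns, alias, model in ordered]
-- ===== Notes on version B (the rewrite author's own statement) =====
-- stated objective: alternative
-- what changed: Replaces A's sorted()-inside-sorted() nested passes with an online insertion sort: one traversal of the raw dict that inserts each (namespace, alias, model) triple at its ordered position in a single running list, then a final formatting map; equal because Python dict keys are unique at each level, so all (namespace, alias) sort keys are distinct.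
import Mathlib
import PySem

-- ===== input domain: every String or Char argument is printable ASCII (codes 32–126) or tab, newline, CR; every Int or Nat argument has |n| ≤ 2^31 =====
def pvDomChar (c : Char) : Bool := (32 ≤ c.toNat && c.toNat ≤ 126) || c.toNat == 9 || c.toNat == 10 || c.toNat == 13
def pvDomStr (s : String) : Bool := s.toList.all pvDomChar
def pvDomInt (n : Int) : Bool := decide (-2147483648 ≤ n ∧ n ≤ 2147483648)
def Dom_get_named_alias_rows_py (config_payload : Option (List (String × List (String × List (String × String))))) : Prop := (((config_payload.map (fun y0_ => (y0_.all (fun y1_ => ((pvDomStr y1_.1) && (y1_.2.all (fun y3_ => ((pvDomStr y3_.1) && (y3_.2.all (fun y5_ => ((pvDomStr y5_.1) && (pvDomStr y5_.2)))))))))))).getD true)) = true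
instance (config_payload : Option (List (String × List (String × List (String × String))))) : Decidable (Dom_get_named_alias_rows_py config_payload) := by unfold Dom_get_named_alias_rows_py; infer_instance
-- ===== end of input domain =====

-- B replaces A's sorted()-inside-sorted() nested passes with an online insertion sort:
-- each triple is placed at its ordered position in one running list (objective: alternative).

-- ===== PORT A =====
-- the typed domain makes every isinstance check on namespaces/aliases/models true,
-- so the 'continue' branches are unreachable and are dropped in the port
def get_named_alias_rows_py (config_payload : Option (List (String × List (String × List (String × String))))) : List (String × String) :=
  match config_payload with
  | none => []  -- not isinstance(config_payload, dict)
  | some cfg =>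
    -- references_payload = config_payload.get("model_references"); dict lookup = first match
    match (cfg.find? (fun p => p.1 == "model_references")).map (fun p => p.2) with
    | none => []  -- not isinstance(references_payload, dict)
    | some refs =>
      -- for namespace, entries in sorted(...): for alias_name, model in sorted(...): rows.append(...)
      (PySem.List.sorted refs (fun item => item.1)).foldl
        (fun rows ne =>
          (PySem.List.sorted ne.2 (fun item => item.1)).foldl
            (fun rows it => rows ++ [("$" ++ ne.1 ++ "." ++ it.1, it.2)]) rows)
        []

-- ===== PORT B =====
-- Source B's while-loop advances past every element whose (namespace, alias) pair is
-- tuple-lexicographically smaller than the new row's and list.insert's there; this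
-- recursive transcription does exactly that (exact, including the tie behaviour).
def pvInsertRow (row : String × String × String) :
    List (String × String × String) → List (String × String × String)
  | [] => [row]
  | x :: xs =>
    if x.1 < row.1 ∨ (x.1 = row.1 ∧ x.2.1 < row.2.1) then x :: pvInsertRow row xs
    else row :: x :: xs

def get_named_alias_rows_py_alt (config_payload : Option (List (String × List (String × List (String × String))))) : List (String × String) :=
  match config_payload with
  | none => []
  | some cfg =>
    match (cfg.find? (fun p => p.1 == "model_references")).map (fun p => p.2) with
    | none => []
    | some refs =>
      -- ordered = []; for each raw namespace, for each raw entry: insert at sorted position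
      let ordered := refs.foldl
        (fun acc ne => ne.2.foldl (fun acc it => pvInsertRow (ne.1, it.1, it.2) acc) acc) []
      -- final formatting pass
      ordered.map (fun t => ("$" ++ t.1 ++ "." ++ t.2.1, t.2.2))

-- ===== PRECONDITION & SPEC =====
-- Pre_ excludes association lists with duplicate keys at some nesting level: such lists have
-- no faithful Python dict counterpart (a Python dict collapses duplicate keys), so neither
-- list-level behaviour there corresponds to an input A accepts.
def Pre_get_named_alias_rows_py (config_payload : Option (List (String × List (String × List (String × String))))) : Prop :=
  ((config_payload.getD []).map Prod.fst).Nodup ∧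
  ∀ ne ∈ config_payload.getD [], (ne.2.map Prod.fst).Nodup ∧
    ∀ e ∈ ne.2, (e.2.map Prod.fst).Nodup
instance (config_payload : Option (List (String × List (String × List (String × String))))) : Decidable (Pre_get_named_alias_rows_py config_payload) := by unfold Pre_get_named_alias_rows_py; infer_instance

def pvWitness_get_named_alias_rows_py : (Option (List (String × List (String × List (String × String))))) :=
  some [("model_references", [("openai", [("fast", "gpt-4o-mini"), ("smart", "gpt-4o")]), ("ali", [("a", "q")])])]

def Spec_get_named_alias_rows_py (config_payload : Option (List (String × List (String × List (String × String))))) (out : List (String × String)) : Prop := out = get_named_alias_rows_py_alt config_payload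
instance (config_payload : Option (List (String × List (String × List (String × String))))) (out : List (String × String)) : Decidable (Spec_get_named_alias_rows_py config_payload out) := by unfold Spec_get_named_alias_rows_py; infer_instance

-- ===== CLAIM (what is proved, stated in full; the proofs are below) =====
def Claim_equal_get_named_alias_rows_py : Prop := ∀ (config_payload : Option (List (String × List (String × List (String × String))))), Dom_get_named_alias_rows_py config_payload → Pre_get_named_alias_rows_py config_payload → Spec_get_named_alias_rows_py config_payload (get_named_alias_rows_py config_payload)

-- ===== LEMMAS AND PROOFS =====

-- the (namespace, alias) sort key of a triple, as one lexicographic value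
def pvKey (t : String × String × String) : Lex (String × String) := toLex (t.1, t.2.1)

-- the insertion guard is exactly strict key comparison
theorem pv_guard_iff (x r : String × String × String) :
    (x.1 < r.1 ∨ (x.1 = r.1 ∧ x.2.1 < r.2.1)) ↔ pvKey x < pvKey r := by
  simp [pvKey, Prod.Lex.lt_iff]

theorem pv_insert_perm (r : String × String × String) (xs : List (String × String × String)) :
    (pvInsertRow r xs).Perm (r :: xs) := by
  induction xs with
  | nil => simp [pvInsertRow]
  | cons x t ih =>
    unfold pvInsertRow
    split
    · exact ((ih.cons x).trans (List.Perm.swap r x t))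
    · exact List.Perm.refl _

theorem pv_insert_pairwise (r : String × String × String) (xs : List (String × String × String))
    (hp : xs.Pairwise (fun a b => pvKey a < pvKey b))
    (hne : ∀ x ∈ xs, pvKey x ≠ pvKey r) :
    (pvInsertRow r xs).Pairwise (fun a b => pvKey a < pvKey b) := by
  induction xs with
  | nil => simp [pvInsertRow]
  | cons x t ih =>
    rw [List.pairwise_cons] at hp
    obtain ⟨hx, ht⟩ := hp
    unfold pvInsertRow
    split
    · rename_i hguard
      have hxr : pvKey x < pvKey r := (pv_guard_iff x r).mp hguard
      refine List.pairwise_cons.mpr ⟨?_, ih ht (fun y hy => hne y (List.mem_cons_of_mem x hy))⟩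
      intro y hy
      rcases List.mem_cons.mp ((pv_insert_perm r t).mem_iff.mp hy) with rfl | h
      · exact hxr
      · exact hx y h
    · rename_i hguard
      have hrx : pvKey r < pvKey x := by
        rcases lt_trichotomy (pvKey r) (pvKey x) with h | h | h
        · exact h
        · exact absurd h.symm (hne x (List.mem_cons_self))
        · exact absurd ((pv_guard_iff x r).mpr h) hguard
      refine List.pairwise_cons.mpr ⟨?_, List.pairwise_cons.mpr ⟨hx, ht⟩⟩
      intro y hy
      rcases List.mem_cons.mp hy with rfl | hy
      · exact hrx
      · exact hrx.trans (hx y hy)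

-- folding pvInsertRow over rows with distinct keys yields a key-sorted permutation
theorem pv_foldl_insert (rows acc : List (String × String × String))
    (hacc : acc.Pairwise (fun a b => pvKey a < pvKey b))
    (hnd : ((acc ++ rows).map pvKey).Nodup) :
    (rows.foldl (fun a r => pvInsertRow r a) acc).Perm (acc ++ rows) ∧
    (rows.foldl (fun a r => pvInsertRow r a) acc).Pairwise (fun a b => pvKey a < pvKey b) := by
  induction rows generalizing acc with
  | nil => exact ⟨by simp, hacc⟩
  | cons r t ih =>
    have hmem : ∀ x ∈ acc, pvKey x ≠ pvKey r := by
      intro x hx heq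
      have hnd2 : ((acc.map pvKey) ++ ((r :: t).map pvKey)).Nodup := by
        rw [← List.map_append]; exact hnd
      exact (List.disjoint_of_nodup_append hnd2) (List.mem_map_of_mem hx)
        (by rw [heq]; exact List.mem_map_of_mem List.mem_cons_self)
    have hacc' : (pvInsertRow r acc).Pairwise (fun a b => pvKey a < pvKey b) :=
      pv_insert_pairwise r acc hacc hmem
    have hperm1 : (pvInsertRow r acc ++ t).Perm (acc ++ r :: t) := by
      have := (pv_insert_perm r acc).append_right t
      exact this.trans (List.perm_middle.symm)
    have hnd' : ((pvInsertRow r acc ++ t).map pvKey).Nodup :=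
      ((hperm1.map pvKey).nodup_iff).mpr hnd
    obtain ⟨hp, hw⟩ := ih (pvInsertRow r acc) hacc' hnd'
    exact ⟨hp.trans hperm1, hw⟩

-- a foldl that appends one rendered element per iteration is append-of-map
theorem pv_foldl_append_singleton {α β : Type} (xs : List α) (f : α → β) (acc : List β) :
    xs.foldl (fun acc x => acc ++ [f x]) acc = acc ++ xs.map f := by
  induction xs generalizing acc with
  | nil => simp
  | cons x t ih => simp [ih]

-- a foldl that appends one block per iteration is append-of-flatMap
theorem pv_foldl_append_block {α β : Type} (xs : List α) (g : α → List β) (acc : List β) :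
    xs.foldl (fun acc x => acc ++ g x) acc = acc ++ xs.flatMap g := by
  induction xs generalizing acc with
  | nil => simp
  | cons x t ih => simp [ih]

-- pairwise ≤ on the sort key plus key-nodup gives strict pairwise <
theorem pv_pairwise_lt_of_sorted_nodup {α : Type} (xs : List α) (key : α → String)
    (hnd : ((PySem.List.sorted xs key).map key).Nodup) :
    (PySem.List.sorted xs key).Pairwise (fun a b => key a < key b) := by
  have hle := PySem.List.sorted_pairwise xs key
  have hne : (PySem.List.sorted xs key).Pairwise (fun a b => key a ≠ key b) :=
    List.pairwise_map.mp hnd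
  exact (hle.and hne).imp (fun h => lt_of_le_of_ne h.1 h.2)

-- A's nested sorted-then-sorted flatten is key-strictly-sorted …
theorem pv_nested_pairwise (refs : List (String × List (String × String)))
    (h0 : (refs.map Prod.fst).Nodup)
    (h1 : ∀ ne ∈ refs, (ne.2.map Prod.fst).Nodup) :
    ((PySem.List.sorted refs (fun item => item.1)).flatMap
        (fun ne => (PySem.List.sorted ne.2 (fun item => item.1)).map
          (fun it => (ne.1, it.1, it.2)))).Pairwise (fun a b => pvKey a < pvKey b) := by
  rw [List.pairwise_flatMap]
  constructor
  · intro ne hne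
    have hmem : ne ∈ refs := (PySem.List.mem_sorted _ _ _ _).mp hne
    have hnd : ((PySem.List.sorted ne.2 (fun item => item.1)).map Prod.fst).Nodup := by
      have hperm : ((PySem.List.sorted ne.2 (fun item => item.1)).map Prod.fst).Perm
          (ne.2.map Prod.fst) := (PySem.List.sorted_perm ne.2 _ false).map _
      exact hperm.nodup_iff.mpr (h1 ne hmem)
    have hlt := pv_pairwise_lt_of_sorted_nodup ne.2 (fun item => item.1) hnd
    rw [List.pairwise_map]
    exact hlt.imp (fun h => by
      rw [pvKey, pvKey, Prod.Lex.lt_iff]; exact Or.inr ⟨rfl, h⟩)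
  · have hnd : ((PySem.List.sorted refs (fun item => item.1)).map Prod.fst).Nodup := by
      have hperm : ((PySem.List.sorted refs (fun item => item.1)).map Prod.fst).Perm
          (refs.map Prod.fst) := (PySem.List.sorted_perm refs _ false).map _
      exact hperm.nodup_iff.mpr h0
    have hlt := pv_pairwise_lt_of_sorted_nodup refs (fun item => item.1) hnd
    exact hlt.imp (fun h x hx y hy => by
      simp only [List.mem_map] at hx hy
      obtain ⟨itx, -, rfl⟩ := hx
      obtain ⟨ity, -, rfl⟩ := hy
      rw [pvKey, pvKey, Prod.Lex.lt_iff]; exact Or.inl h)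

-- … and a permutation of the flat triple list
theorem pv_nested_perm (refs : List (String × List (String × String))) :
    ((PySem.List.sorted refs (fun item => item.1)).flatMap
        (fun ne => (PySem.List.sorted ne.2 (fun item => item.1)).map
          (fun it => (ne.1, it.1, it.2)))).Perm
      (refs.flatMap (fun ne => ne.2.map (fun it => (ne.1, it.1, it.2)))) :=
  List.Perm.flatMap (PySem.List.sorted_perm refs _ false)
    (fun ne _ => (PySem.List.sorted_perm ne.2 _ false).map _)

-- the flat triples carry distinct keys
theorem pv_flat_nodup (refs : List (String × List (String × String)))
    (h0 : (refs.map Prod.fst).Nodup)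
    (h1 : ∀ ne ∈ refs, (ne.2.map Prod.fst).Nodup) :
    ((refs.flatMap (fun ne => ne.2.map (fun it => (ne.1, it.1, it.2)))).map pvKey).Nodup := by
  rw [List.map_flatMap]
  rw [List.nodup_flatMap]
  constructor
  · intro ne hne
    rw [List.map_map]
    have : List.map (pvKey ∘ fun it : String × String => (ne.1, it.1, it.2)) ne.2 =
        List.map ((fun s => toLex (ne.1, s)) ∘ Prod.fst) ne.2 := rfl
    rw [this, ← List.map_map]
    exact (h1 ne hne).map (fun a b h => by
      have := congrArg (fun p => (ofLex p).2) h; simpa using this)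
  · have : refs.Pairwise (fun a b => a.1 ≠ b.1) := List.pairwise_map.mp h0
    exact this.imp (fun {a b} hne => by
      intro x hx hy
      simp only [List.map_map, List.mem_map, Function.comp] at hx hy
      obtain ⟨ia, -, rfl⟩ := hx
      obtain ⟨ib, -, hb⟩ := hy
      exact hne (congrArg (fun p => (ofLex p).1) hb.symm))

-- ===== VERDICT (by name: the statement is the Claim_ definition above) =====
theorem get_named_alias_rows_py_spec : Claim_equal_get_named_alias_rows_py := by
  intro config_payload _ hpre
  unfold Spec_get_named_alias_rows_py get_named_alias_rows_py get_named_alias_rows_py_alt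
  cases config_payload with
  | none => rfl
  | some cfg =>
    rcases hpre with ⟨-, hpre2⟩
    simp only [Option.getD_some] at hpre2
    cases hfind : (cfg.find? (fun p => p.1 == "model_references")).map (fun p => p.2) with
    | none => simp only [hfind]
    | some refs =>
      simp only [hfind]
      obtain ⟨p, hp, rfl⟩ := Option.map_eq_some_iff.mp hfind
      obtain ⟨h0, h1⟩ := hpre2 p (List.mem_of_find?_eq_some hp)
      -- name the flat triple list and the two orderings of it
      set flat := p.2.flatMap (fun ne => ne.2.map (fun it => (ne.1, it.1, it.2))) with hflat
      -- B's folded insertions, rewritten as one fold over flat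
      have hBfold : p.2.foldl
          (fun acc ne => ne.2.foldl (fun acc it => pvInsertRow (ne.1, it.1, it.2) acc) acc) [] =
          flat.foldl (fun a r => pvInsertRow r a) [] := by
        rw [hflat, List.foldl_flatMap]
        simp only [List.foldl_map]
      obtain ⟨hBperm, hBpair⟩ := pv_foldl_insert flat []
        (List.Pairwise.nil) (by simpa using pv_flat_nodup p.2 h0 h1)
      -- A's nested output in closed form
      have hA : (PySem.List.sorted p.2 (fun item => item.1)).foldl
          (fun rows ne => (PySem.List.sorted ne.2 (fun item => item.1)).foldl
            (fun rows it => rows ++ [("$" ++ ne.1 ++ "." ++ it.1, it.2)]) rows) [] =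
          ((PySem.List.sorted p.2 (fun item => item.1)).flatMap
            (fun ne => (PySem.List.sorted ne.2 (fun item => item.1)).map
              (fun it => (ne.1, it.1, it.2)))).map
            (fun t => ("$" ++ t.1 ++ "." ++ t.2.1, t.2.2)) := by
        rw [List.map_flatMap]
        have hblock : ∀ ne : String × List (String × String), ∀ rows : List (String × String),
            (PySem.List.sorted ne.2 (fun item => item.1)).foldl
              (fun rows it => rows ++ [("$" ++ ne.1 ++ "." ++ it.1, it.2)]) rows =
            rows ++ ((PySem.List.sorted ne.2 (fun item => item.1)).map
              (fun it => (ne.1, it.1, it.2))).map (fun t => ("$" ++ t.1 ++ "." ++ t.2.1, t.2.2)) := by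
          intro ne rows
          rw [pv_foldl_append_singleton, List.map_map]
          rfl
        simp only [hblock, pv_foldl_append_block, List.nil_append]
      rw [hA, hBfold]
      -- the two strictly key-sorted permutations of flat coincide
      have heq : ((PySem.List.sorted p.2 (fun item => item.1)).flatMap
            (fun ne => (PySem.List.sorted ne.2 (fun item => item.1)).map
              (fun it => (ne.1, it.1, it.2)))) =
          flat.foldl (fun a r => pvInsertRow r a) [] := by
        apply List.Perm.eq_of_pairwise
          (le := fun a b => pvKey a < pvKey b)
          (fun a b _ _ h1 h2 => absurd h2 (lt_asymm h1))
          (pv_nested_pairwise p.2 h0 h1) hBpair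
        have hnil : (([] : List (String × String × String)) ++ flat).Perm flat := by simp
        exact (pv_nested_perm p.2).trans (hBperm.trans hnil).symm
      rw [heq]
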